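-- pv_equiv track=rewrite | github.com/nishatdbdlt/problem_solving | mishat.py | isValida
-- ===== SOURCE A (Python) =====
-- def isValida(s):
--     st = []
--     mp = {")": "(", "]": "[", "}": "{"}
--
--     for ch in s:
--         if ch in mp:
--             # closing bracket
--             if not st or st[-1] != mp[ch]:
--                 return False
--             st.pop()
--         else:
--             # opening bracket
--             st.append(ch)
--
--     return len(st) == 0
-- ===== SOURCE B (Python) =====
-- def isValida(s):
--     # repeated pair-elimination instead of a stack: strip adjacent matched
--     # pairs until a fixpoint; valid iff nothing is left
--     while '()' in s or '[]' in s or '{}' in s: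
--         s = s.replace('()', '').replace('[]', '').replace('{}', '')
--     return s == ''
-- ===== Notes on version B (the rewrite author's own statement) =====
-- stated objective: alternative
-- what changed: Replaced the one-pass stack validator by repeated elimination of adjacent matched pairs via str.replace until a fixpoint, returning whether the residue is empty.
import Mathlib
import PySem

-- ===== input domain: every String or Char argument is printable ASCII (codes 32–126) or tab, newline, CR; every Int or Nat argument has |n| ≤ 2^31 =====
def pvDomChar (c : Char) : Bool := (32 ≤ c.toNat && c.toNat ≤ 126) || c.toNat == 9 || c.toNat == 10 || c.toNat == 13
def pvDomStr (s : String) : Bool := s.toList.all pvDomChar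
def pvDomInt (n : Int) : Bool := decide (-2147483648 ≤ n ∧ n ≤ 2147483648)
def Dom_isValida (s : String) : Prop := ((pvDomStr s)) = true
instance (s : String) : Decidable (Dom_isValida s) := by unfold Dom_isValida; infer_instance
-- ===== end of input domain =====

-- B replaces A's one-pass stack scan by repeated elimination of adjacent matched pairs
-- (a fixpoint of str.replace) — a genuinely different strategy of similar size (objective: alternative).

-- ===== PORT A =====
-- hand port of lookup in A's literal 3-entry dict mp = {")":"(", "]":"[", "}":"{"} (exact)
def mpGetA (ch : Char) : Option Char :=
  if ch = ')' then some '(' else if ch = ']' then some '[' else if ch = '}' then some '{' else none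

-- one iteration of A's for-loop; the list is the stack st with head = st[-1];
-- none encodes the early `return False`
def stepA (o : Option (List Char)) (ch : Char) : Option (List Char) :=
  match o with
  | none => none
  | some st =>
    match mpGetA ch with
    | some op =>
      match st with
      | [] => none                                   -- `if not st: return False`
      | top :: rest => if top = op then some rest else none  -- pop / `return False`
    | none => some (ch :: st)                        -- st.append(ch)

def isValida (s : String) : Bool :=
  match List.foldl stepA (some []) s.toList with
  | some st => st.isEmpty                            -- `return len(st) == 0`
  | none => false

-- ===== PORT B =====
-- hand port of `s.replace(a+b, '')` for a 2-character pattern: drop each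
-- non-overlapping occurrence scanning left to right (exact for empty replacement)
def removePairsB (a b : Char) : List Char → List Char
  | x :: y :: rest =>
      if x = a ∧ y = b then removePairsB a b rest
      else x :: removePairsB a b (y :: rest)
  | l => l

-- hand port of `a+b in s` for a 2-character pattern (exact)
def containsPairB (a b : Char) : List Char → Bool
  | x :: y :: rest =>
      if x = a ∧ y = b then true else containsPairB a b (y :: rest)
  | _ => false

-- lemmas cited by loopB's termination proof
theorem removePairsB_length_le (a b : Char) : ∀ l : List Char, (removePairsB a b l).length ≤ l.length
  | [] => Nat.le_refl _
  | [x] => Nat.le_refl _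
  | x :: y :: rest => by
      by_cases h : x = a ∧ y = b
      · simp only [removePairsB, if_pos h]
        calc (removePairsB a b rest).length ≤ rest.length := removePairsB_length_le a b rest
          _ ≤ (x :: y :: rest).length := by simp; omega
      · simp only [removePairsB, if_neg h, List.length_cons]
        have := removePairsB_length_le a b (y :: rest)
        simp only [List.length_cons] at this ⊢
        omega

theorem removePairsB_eq_of_not_contains (a b : Char) :
    ∀ l : List Char, containsPairB a b l = false → removePairsB a b l = l
  | [] , _ => rfl
  | [x], _ => rfl
  | x :: y :: rest, h => by
      by_cases hp : x = a ∧ y = b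
      · simp [containsPairB, if_pos hp] at h
      · simp only [containsPairB, if_neg hp] at h
        simp only [removePairsB, if_neg hp]
        rw [removePairsB_eq_of_not_contains a b (y :: rest) h]

theorem removePairsB_length_lt (a b : Char) :
    ∀ l : List Char, containsPairB a b l = true → (removePairsB a b l).length < l.length
  | x :: y :: rest, h => by
      by_cases hp : x = a ∧ y = b
      · simp only [removePairsB, if_pos hp]
        have := removePairsB_length_le a b rest
        simp only [List.length_cons]
        omega
      · simp only [containsPairB, if_neg hp] at h
        simp only [removePairsB, if_neg hp, List.length_cons]
        have := removePairsB_length_lt a b (y :: rest) h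
        simp only [List.length_cons] at this
        omega

theorem loopB_dec (l : List Char)
    (h : (containsPairB '(' ')' l || containsPairB '[' ']' l || containsPairB '{' '}' l) = true) :
    (removePairsB '{' '}' (removePairsB '[' ']' (removePairsB '(' ')' l))).length < l.length := by
  have le2 := removePairsB_length_le '[' ']' (removePairsB '(' ')' l)
  have le3 := removePairsB_length_le '{' '}' (removePairsB '[' ']' (removePairsB '(' ')' l))
  by_cases h1 : containsPairB '(' ')' l = true
  · have := removePairsB_length_lt '(' ')' l h1
    omega
  · have e1 : removePairsB '(' ')' l = l :=
      removePairsB_eq_of_not_contains _ _ l (by simpa using h1)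
    by_cases h2 : containsPairB '[' ']' l = true
    · have := removePairsB_length_lt '[' ']' l h2
      rw [e1] at le3 ⊢
      omega
    · have e2 : removePairsB '[' ']' l = l :=
        removePairsB_eq_of_not_contains _ _ l (by simpa using h2)
      have h3 : containsPairB '{' '}' l = true := by
        rcases Bool.or_eq_true_iff.mp h with h' | h'
        · rcases Bool.or_eq_true_iff.mp h' with h'' | h''
          · exact absurd h'' h1
          · exact absurd h'' h2
        · exact h'
      have := removePairsB_length_lt '{' '}' l h3
      rw [e1, e2]
      exact this

-- the while-loop of B: strip all three pair patterns until none occurs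
def loopB (l : List Char) : List Char :=
  if h : (containsPairB '(' ')' l || containsPairB '[' ']' l || containsPairB '{' '}' l) = true then
    loopB (removePairsB '{' '}' (removePairsB '[' ']' (removePairsB '(' ')' l)))
  else l
termination_by l.length
decreasing_by exact loopB_dec l h

def isValida_alt (s : String) : Bool :=
  (loopB s.toList).isEmpty                           -- `return s == ''`

-- ===== PRECONDITION & SPEC =====
def Spec_isValida (s : String) (out : Bool) : Prop := out = isValida_alt s
instance (s : String) (out : Bool) : Decidable (Spec_isValida s out) := by unfold Spec_isValida; infer_instance

-- ===== CLAIM (what is proved, stated in full; the proofs are below) =====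
def Claim_equal_isValida : Prop := ∀ (s : String), Dom_isValida s → Spec_isValida s (isValida s)

-- ===== LEMMAS AND PROOFS =====

theorem foldl_stepA_none : ∀ l : List Char, List.foldl stepA none l = none
  | [] => rfl
  | _ :: t => foldl_stepA_none t

-- removing an adjacent matched pair does not change A's run (from any state)
theorem removePairs_run (a b : Char) (hab : ∀ o : Option (List Char), stepA (stepA o a) b = o) :
    ∀ (l : List Char) (o : Option (List Char)),
      List.foldl stepA o (removePairsB a b l) = List.foldl stepA o l
  | [], _ => rfl
  | [x], _ => rfl
  | x :: y :: rest, o => by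
      by_cases h : x = a ∧ y = b
      · simp only [removePairsB, if_pos h]
        rw [removePairs_run a b hab rest o, List.foldl_cons, List.foldl_cons, h.1, h.2]
        simp only [hab o]
      · simp only [removePairsB, if_neg h, List.foldl_cons]
        exact removePairs_run a b hab (y :: rest) (stepA o x)

theorem hab_paren : ∀ o : Option (List Char), stepA (stepA o '(') ')' = o := by
  intro o; cases o with
  | none => rfl
  | some st => rfl

theorem hab_square : ∀ o : Option (List Char), stepA (stepA o '[') ']' = o := by
  intro o; cases o with
  | none => rfl
  | some st => rfl

theorem hab_curly : ∀ o : Option (List Char), stepA (stepA o '{') '}' = o := by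
  intro o; cases o with
  | none => rfl
  | some st => rfl

-- a run over non-closing characters only pushes
theorem push_run : ∀ (u : List Char), (∀ c ∈ u, mpGetA c = none) →
    ∀ st : List Char, List.foldl stepA (some st) u = some (u.reverse ++ st)
  | [], _, st => by simp
  | x :: t, h, st => by
      have hx : mpGetA x = none := h x (by simp)
      have hstep : stepA (some st) x = some (x :: st) := by
        simp [stepA, hx]
      simp only [List.foldl_cons, hstep]
      rw [push_run t (fun c hc => h c (by simp [hc])) (x :: st)]
      simp

-- split a list at its first closing bracket (or show it has none)
theorem split_first_close : ∀ l : List Char,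
    (∀ c ∈ l, mpGetA c = none) ∨
    ∃ u ch v, l = u ++ ch :: v ∧ (∀ c ∈ u, mpGetA c = none) ∧ mpGetA ch ≠ none
  | [] => Or.inl (by simp)
  | x :: t => by
      by_cases hx : mpGetA x = none
      · rcases split_first_close t with h | ⟨u, ch, v, he, hu, hch⟩
        · exact Or.inl (by intro c hc; rcases List.mem_cons.mp hc with rfl | hc; exact hx; exact h c hc)
        · refine Or.inr ⟨x :: u, ch, v, by simp [he], ?_, hch⟩
          intro c hc; rcases List.mem_cons.mp hc with rfl | hc; exact hx; exact hu c hc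
      · exact Or.inr ⟨[], x, t, rfl, by simp, hx⟩

theorem containsPairB_cons (a b x : Char) {t : List Char} (h : containsPairB a b t = true) :
    containsPairB a b (x :: t) = true := by
  cases t with
  | nil => simp [containsPairB] at h
  | cons y rest =>
      by_cases hp : x = a ∧ y = b
      · simp [containsPairB, if_pos hp]
      · simpa [containsPairB, if_neg hp] using h

theorem containsPairB_append (a b : Char) :
    ∀ (u v : List Char), containsPairB a b (u ++ a :: b :: v) = true
  | [], v => by simp [containsPairB]
  | x :: u, v => containsPairB_cons a b x (containsPairB_append a b u v)

theorem mpGetA_cases (ch op : Char) (h : mpGetA ch = some op) :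
    (ch = ')' ∧ op = '(') ∨ (ch = ']' ∧ op = '[') ∨ (ch = '}' ∧ op = '{') := by
  unfold mpGetA at h
  split_ifs at h with h1 h2 h3
  · injection h with h'; exact Or.inl ⟨h1, h'.symm⟩
  · injection h with h'; exact Or.inr (Or.inl ⟨h2, h'.symm⟩)
  · injection h with h'; exact Or.inr (Or.inr ⟨h3, h'.symm⟩)

-- a nonempty string with no adjacent matched pair is never accepted by A
theorem no_pairs_run_ne (l : List Char)
    (h1 : containsPairB '(' ')' l = false)
    (h2 : containsPairB '[' ']' l = false)
    (h3 : containsPairB '{' '}' l = false)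
    (hne : l ≠ []) :
    List.foldl stepA (some []) l ≠ some [] := by
  rcases split_first_close l with hall | ⟨u, ch, v, he, hu, hch⟩
  · rw [push_run l hall []]
    simp only [List.append_nil]
    intro hc
    exact hne (by simpa using congrArg List.reverse (Option.some.inj hc))
  · cases hop : mpGetA ch with
    | none => exact absurd hop hch
    | some op =>
      subst he
      rw [List.foldl_append, push_run u hu [], List.append_nil, List.foldl_cons]
      cases hr : u.reverse with
      | nil =>
          have hstep : stepA (some ([] : List Char)) ch = none := by
            simp [stepA, hop]
          rw [hstep, foldl_stepA_none]
          simp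
      | cons c w =>
          have hu' : u = w.reverse ++ [c] := by
            have := congrArg List.reverse hr
            simpa using this
          by_cases hco : c = op
          · exfalso
            subst hco
            have hl : w.reverse ++ [c] ++ ch :: v = w.reverse ++ c :: ch :: v := by simp
            rcases mpGetA_cases ch c hop with ⟨rfl, rfl⟩ | ⟨rfl, rfl⟩ | ⟨rfl, rfl⟩
            · rw [hu', hl, containsPairB_append] at h1; exact Bool.true_eq_false.mp h1
            · rw [hu', hl, containsPairB_append] at h2; exact Bool.true_eq_false.mp h2
            · rw [hu', hl, containsPairB_append] at h3; exact Bool.true_eq_false.mp h3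
          · have hstep : stepA (some (c :: w)) ch = none := by
              simp [stepA, hop, hco]
            rw [hstep, foldl_stepA_none]
            simp

-- B's loop does not change A's run
theorem loopB_run : ∀ l : List Char,
    List.foldl stepA (some []) (loopB l) = List.foldl stepA (some []) l := by
  intro l
  fun_induction loopB l with
  | case1 l h ih =>
      rw [ih,
        removePairs_run '{' '}' hab_curly,
        removePairs_run '[' ']' hab_square,
        removePairs_run '(' ')' hab_paren]
  | case2 l _ => rfl

-- B's loop terminates with no pair left
theorem loopB_noPairs : ∀ l : List Char,
    containsPairB '(' ')' (loopB l) = false ∧ containsPairB '[' ']' (loopB l) = false ∧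
      containsPairB '{' '}' (loopB l) = false := by
  intro l
  fun_induction loopB l with
  | case1 l h ih => exact ih
  | case2 l h =>
      simp only [Bool.or_eq_true, not_or, Bool.not_eq_true] at h
      exact ⟨h.1.1, h.1.2, h.2⟩

-- ===== VERDICT (by name: the statement is the Claim_ definition above) =====
theorem isValida_spec : Claim_equal_isValida := by
  intro s _
  unfold Spec_isValida isValida isValida_alt
  have hrun := loopB_run s.toList
  obtain ⟨h1, h2, h3⟩ := loopB_noPairs s.toList
  cases hr : loopB s.toList with
  | nil =>
      rw [hr] at hrun
      simp only [List.foldl_nil] at hrun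
      rw [← hrun]
  | cons c t =>
      have hne := no_pairs_run_ne (loopB s.toList) h1 h2 h3 (by rw [hr]; simp)
      rw [hrun] at hne
      cases hv : List.foldl stepA (some []) s.toList with
      | none => rfl
      | some st =>
          cases st with
          | nil => exact absurd hv hne
          | cons a b => rfl
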